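-- pv_equiv track=rewrite | github.com/drawnator/olimpiadas_2022 | global round 23/bg23.py | solve
-- ===== SOURCE A (Python) =====
-- def solve(n,l):
--     operations = 0
--     p1 = 0
--     p2 = n-1
--     while p1 <= p2:
--         if l[p1]:
--             while l[p2] and p1 != p2:
--                 p2 = p2 - 1
--             if not l[p2]:
--                 l[p2] = 1
--                 operations = operations + 1
--         p1 = p1 + 1
--     return operations
-- ===== SOURCE B (Python) =====
-- def solve(n, l):
--     ones = [i for i in range(n) if l[i]]
--     zeros = [i for i in range(n) if not l[i]]
--     k = 0
--     for a, b in zip(ones, reversed(zeros)):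
--         if a < b:
--             k += 1
--         else:
--             break
--     for idx in zeros[len(zeros) - k:]:
--         l[idx] = 1
--     return k
-- ===== Notes on version B (the rewrite author's own statement) =====
-- stated objective: alternative
-- what changed: Replaces A's interleaved mutating two-pointer scan by extracting the one/zero position lists once, counting the leading run of pairs (i-th one from the left, i-th zero from the right) with ones[i] < zeros[-1-i], then marking the counted rightmost zeros in one separate pass.
import Mathlib
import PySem

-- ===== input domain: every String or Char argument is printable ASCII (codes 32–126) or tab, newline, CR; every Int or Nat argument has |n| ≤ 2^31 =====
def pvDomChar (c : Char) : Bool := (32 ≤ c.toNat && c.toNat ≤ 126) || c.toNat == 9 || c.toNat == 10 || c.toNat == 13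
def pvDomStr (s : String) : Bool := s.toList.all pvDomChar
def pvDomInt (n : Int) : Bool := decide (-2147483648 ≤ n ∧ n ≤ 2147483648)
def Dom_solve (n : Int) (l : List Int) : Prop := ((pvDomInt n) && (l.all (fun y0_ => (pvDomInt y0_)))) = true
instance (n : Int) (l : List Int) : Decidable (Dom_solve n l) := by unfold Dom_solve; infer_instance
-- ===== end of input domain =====

-- B replaces A's interleaved mutating two-pointer scan by extracting the one/zero position
-- lists once and counting the leading run of pairs (i-th one, i-th zero from the right);
-- both Pythons mutate l the same way, and the equivalence proved here is about the RETURN value.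

-- ===== PORT A =====
-- inner 'while l[p2] and p1 != p2: p2 -= 1'; fuel only makes the recursion total
def pvInnerA (l : List Int) (p1 : Int) : Nat → Int → Int
  | 0, p2 => p2
  | f + 1, p2 =>
      if (PySem.List.pyGetD l p2 0 != 0) && (p1 != p2) then pvInnerA l p1 f (p2 - 1) else p2

-- outer 'while p1 <= p2' loop with state (l, p1, p2, operations); fuel only makes it total
def pvOuterA (l : List Int) : Nat → Int → Int → Int → Int
  | 0, _, _, ops => ops
  | f + 1, p1, p2, ops =>
      if p1 ≤ p2 then
        if PySem.List.pyGetD l p1 0 != 0 then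
          let p2' := pvInnerA l p1 (p2 - p1).toNat p2
          if PySem.List.pyGetD l p2' 0 == 0 then
            pvOuterA (PySem.List.pySetD l p2' 1) f (p1 + 1) p2' (ops + 1)
          else
            pvOuterA l f (p1 + 1) p2' ops
        else pvOuterA l f (p1 + 1) p2 ops
      else ops

def solve (n : Int) (l : List Int) : Int :=
  pvOuterA l (n.toNat + 1) 0 (n - 1) 0

-- ===== PORT B =====
-- 'for a, b in zip(ones, reversed(zeros)): if a < b: k += 1 else: break'
def pvCountPairs : List (Int × Int) → Int
  | [] => 0
  | (a, b) :: rest => if a < b then 1 + pvCountPairs rest else 0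

def solve_alt (n : Int) (l : List Int) : Int :=
  let ones := (PySem.List.pyRange 0 n 1).filter (fun i => PySem.List.pyGetD l i 0 != 0)
  let zeros := (PySem.List.pyRange 0 n 1).filter (fun i => PySem.List.pyGetD l i 0 == 0)
  pvCountPairs (ones.zip zeros.reverse)

-- ===== PRECONDITION & SPEC =====
-- A indexes l[0..n-1]; it raises IndexError exactly when 0 < n and n > len(l).
def Pre_solve (n : Int) (l : List Int) : Prop := n ≤ 0 ∨ n ≤ (l.length : Int)
instance (n : Int) (l : List Int) : Decidable (Pre_solve n l) := by unfold Pre_solve; infer_instance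
def pvWitness_solve : Int × List Int := (3, [1, 0, 1])

def Spec_solve (n : Int) (l : List Int) (out : Int) : Prop := out = solve_alt n l
instance (n : Int) (l : List Int) (out : Int) : Decidable (Spec_solve n l out) := by unfold Spec_solve; infer_instance

-- ===== CLAIM (what is proved, stated in full; the proofs are below) =====
def Claim_equal_solve : Prop := ∀ (n : Int) (l : List Int), Dom_solve n l → Pre_solve n l → Spec_solve n l (solve n l)

-- ===== LEMMAS AND PROOFS =====

-- window position lists (the ports' filters with general bounds)
def wOnes (l : List Int) (a b : Int) : List Int :=
  (PySem.List.pyRange a b 1).filter (fun i => PySem.List.pyGetD l i 0 != 0)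
def wZeros (l : List Int) (a b : Int) : List Int :=
  (PySem.List.pyRange a b 1).filter (fun i => PySem.List.pyGetD l i 0 == 0)

lemma countPairs_zip_nil_or_fail (T R : List Int) (h : ∀ a ∈ T, ∀ b ∈ R, ¬ a < b) :
    pvCountPairs (T.zip R) = 0 := by
  cases T with
  | nil => simp [pvCountPairs]
  | cons a T' =>
    cases R with
    | nil => simp [pvCountPairs]
    | cons b R' =>
      have : ¬ a < b := h a (by simp) b (by simp)
      simp [pvCountPairs, List.zip, this]

lemma countPairs_zip_append_left (M T R : List Int) (h : ∀ a ∈ T, ∀ b ∈ R, ¬ a < b) :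
    pvCountPairs ((M ++ T).zip R) = pvCountPairs (M.zip R) := by
  induction M generalizing R with
  | nil => simpa using countPairs_zip_nil_or_fail T R h
  | cons m M' ih =>
    cases R with
    | nil => simp [pvCountPairs]
    | cons r R' =>
      simp only [List.cons_append, List.zip_cons_cons, pvCountPairs]
      rw [ih R' (fun a ha b hb => h a ha b (by simp [hb]))]

lemma countPairs_zip_snd_append (os zs : List Int) (b : Int) (h : ∀ a ∈ os, ¬ a < b) :
    pvCountPairs (os.zip (zs ++ [b])) = pvCountPairs (os.zip zs) := by
  induction os generalizing zs with
  | nil => simp [pvCountPairs]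
  | cons a os' ih =>
    cases zs with
    | nil =>
      have : ¬ a < b := h a (by simp)
      simp [pvCountPairs, List.zip, this]
    | cons c zs' =>
      simp only [List.cons_append, List.zip_cons_cons, pvCountPairs]
      rw [ih zs' (fun x hx => h x (by simp [hx]))]

lemma innerA_spec (l : List Int) (p1 : Int) :
    ∀ (f : Nat) (p2 : Int), p1 ≤ p2 → (p2 - p1).toNat ≤ f →
      p1 ≤ pvInnerA l p1 f p2 ∧ pvInnerA l p1 f p2 ≤ p2 ∧
      (PySem.List.pyGetD l (pvInnerA l p1 f p2) 0 = 0 ∨ pvInnerA l p1 f p2 = p1) ∧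
      (∀ i, pvInnerA l p1 f p2 < i → i ≤ p2 → PySem.List.pyGetD l i 0 ≠ 0) := by
  intro f
  induction f with
  | zero =>
    intro p2 hle hf
    have hp : p2 = p1 := by omega
    subst hp
    refine ⟨le_refl _, le_refl _, Or.inr rfl, ?_⟩
    intro i h1 h2
    simp [pvInnerA] at h1 h2
    omega
  | succ f ih =>
    intro p2 hle hf
    by_cases h : ((PySem.List.pyGetD l p2 0 != 0) && (p1 != p2)) = true
    · have hcond : PySem.List.pyGetD l p2 0 ≠ 0 ∧ p1 ≠ p2 := by
        simpa using h
      have hlt : p1 ≤ p2 - 1 := by omega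
      have hgo : pvInnerA l p1 (f + 1) p2 = pvInnerA l p1 f (p2 - 1) := by
        simp [pvInnerA, h]
      obtain ⟨ih1, ih2, ih3, ih4⟩ := ih (p2 - 1) hlt (by omega)
      rw [hgo]
      refine ⟨ih1, by omega, ih3, ?_⟩
      intro i h1 h2
      rcases lt_or_ge i p2 with hi | hi
      · exact ih4 i h1 (by omega)
      · have : i = p2 := by omega
        subst this
        exact hcond.1
    · have hstop : pvInnerA l p1 (f + 1) p2 = p2 := by
        simp only [pvInnerA, if_neg h]
      rw [hstop]
      have : PySem.List.pyGetD l p2 0 = 0 ∨ p2 = p1 := by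
        by_cases hz : PySem.List.pyGetD l p2 0 = 0
        · exact Or.inl hz
        · refine Or.inr ?_
          by_contra hc
          exact h (by simp [hz]; omega)
      refine ⟨hle, le_refl _, ?_, ?_⟩
      · rcases this with h' | h'
        · exact Or.inl h'
        · exact Or.inr h'
      · intro i h1 h2; omega

lemma pyGetD_pySetD_ne (l : List Int) (q i v : Int) (h0 : 0 ≤ q) (h0i : 0 ≤ i) (hne : i ≠ q) :
    PySem.List.pyGetD (PySem.List.pySetD l q v) i 0 = PySem.List.pyGetD l i 0 := by
  rw [PySem.List.pySetD_of_nonneg l v h0, PySem.List.pyGetD_of_nonneg _ _ h0i,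
    PySem.List.pyGetD_of_nonneg _ _ h0i]
  have hne' : q.toNat ≠ i.toNat := by omega
  simp [List.getD, hne']

lemma pyGetD_pySetD_self (l : List Int) (q v : Int) (h0 : 0 ≤ q) (hq : q < (l.length : Int)) :
    PySem.List.pyGetD (PySem.List.pySetD l q v) q 0 = v := by
  rw [PySem.List.pySetD_of_nonneg l v h0, PySem.List.pyGetD_of_nonneg _ _ h0]
  have hq' : q.toNat < l.length := by omega
  simp [List.getD, hq']

lemma outerA_eq (f : Nat) :
    ∀ (l : List Int) (p1 p2 ops : Int), 0 ≤ p1 → p2 < (l.length : Int) →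
      (p2 + 1 - p1).toNat + 1 ≤ f →
      pvOuterA l f p1 p2 ops
        = ops + pvCountPairs ((wOnes l p1 (p2 + 1)).zip (wZeros l p1 (p2 + 1)).reverse) := by
  induction f with
  | zero => intro l p1 p2 ops _ _ hf; omega
  | succ f ih =>
    intro l p1 p2 ops h0 hlen hf
    by_cases hpp : p1 ≤ p2
    · by_cases h1 : (PySem.List.pyGetD l p1 0 != 0) = true
      · -- l[p1] is truthy
        have hq := innerA_spec l p1 (p2 - p1).toNat p2 hpp (le_refl _)
        set q := pvInnerA l p1 (p2 - p1).toNat p2 with hqdef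
        obtain ⟨hq1, hq2, hq3, hq4⟩ := hq
        have hT : ∀ a ∈ (PySem.List.pyRange (q+1) (p2+1) 1).filter
            (fun i => PySem.List.pyGetD l i 0 != 0), q < a := by
          intro a ha
          have := (List.mem_filter.mp ha).1
          have := PySem.List.mem_pyRange_one.mp this
          omega
        by_cases h2 : (PySem.List.pyGetD l q 0 == 0) = true
        · -- flip the rightmost zero q
          have hq0 : PySem.List.pyGetD l q 0 = 0 := by simpa using h2
          have hp1q : p1 < q := by
            rcases lt_or_ge p1 q with h | h
            · exact h
            · exfalso
              have : q = p1 := by omega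
              rw [this] at hq0
              simp [hq0] at h1
          have hstep : pvOuterA l (f+1) p1 p2 ops
              = pvOuterA (PySem.List.pySetD l q 1) f (p1+1) q (ops+1) := by
            simp only [pvOuterA, if_pos hpp, if_pos h1, ← hqdef, if_pos h2]
          rw [hstep, ih (PySem.List.pySetD l q 1) (p1+1) q (ops+1) (by omega)
            (by rw [PySem.List.length_pySetD]; omega) (by omega)]
          -- rewrite the windows of the mutated list back to l
          have hOnes' : wOnes (PySem.List.pySetD l q 1) (p1+1) (q+1)
              = wOnes l (p1+1) q ++ [q] := by
            unfold wOnes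
            rw [PySem.List.pyRange_one_succ_right (by omega : p1+1 ≤ q), List.filter_append]
            congr 1
            · apply List.filter_congr
              intro i hi
              have hmem := PySem.List.mem_pyRange_one.mp hi
              rw [pyGetD_pySetD_ne l q i 1 (by omega) (by omega) (by omega)]
            · simp [pyGetD_pySetD_self l q 1 (by omega) (by omega)]
          have hZeros' : wZeros (PySem.List.pySetD l q 1) (p1+1) (q+1)
              = wZeros l (p1+1) q := by
            unfold wZeros
            rw [PySem.List.pyRange_one_succ_right (by omega : p1+1 ≤ q), List.filter_append]
            have : (List.filter (fun i => PySem.List.pyGetD (PySem.List.pySetD l q 1) i 0 == 0) [q]) = [] := by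
              simp [pyGetD_pySetD_self l q 1 (by omega) (by omega)]
            rw [this, List.append_nil]
            apply List.filter_congr
            intro i hi
            have hmem := PySem.List.mem_pyRange_one.mp hi
            rw [pyGetD_pySetD_ne l q i 1 (by omega) (by omega) (by omega)]
          rw [hOnes', hZeros']
          -- decompose the original window at p1 and q
          have hsplit : PySem.List.pyRange p1 (p2+1) 1
              = p1 :: ((PySem.List.pyRange (p1+1) q 1 ++ [q]) ++ PySem.List.pyRange (q+1) (p2+1) 1) := by
            rw [PySem.List.pyRange_one_cons (by omega : p1 < p2+1),
              PySem.List.pyRange_one_append (p1+1) (q+1) (p2+1) (by omega) (by omega),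
              PySem.List.pyRange_one_succ_right (by omega : p1+1 ≤ q)]
          have hOnes : wOnes l p1 (p2+1)
              = p1 :: (wOnes l (p1+1) q
                  ++ (PySem.List.pyRange (q+1) (p2+1) 1).filter (fun i => PySem.List.pyGetD l i 0 != 0)) := by
            unfold wOnes
            rw [hsplit]
            simp only [List.filter_cons, List.filter_append, h1]
            simp [hq0]
          have hZeros : wZeros l p1 (p2+1) = wZeros l (p1+1) q ++ [q] := by
            unfold wZeros
            rw [hsplit]
            simp only [List.filter_cons, List.filter_append]
            have hp1 : (PySem.List.pyGetD l p1 0 == 0) = false := by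
              simp at h1 ⊢; exact h1
            have hqz : (PySem.List.pyGetD l q 0 == 0) = true := h2
            have hTnil : (PySem.List.pyRange (q+1) (p2+1) 1).filter
                (fun i => PySem.List.pyGetD l i 0 == 0) = [] := by
              apply List.filter_eq_nil_iff.mpr
              intro a ha
              have hmem := PySem.List.mem_pyRange_one.mp ha
              have := hq4 a (by omega) (by omega)
              simp [this]
            rw [hTnil]
            simp [hp1, hqz]
          rw [hOnes, hZeros]
          -- peel the first pair (p1, q) and drop the all-ones tails
          have hZm : ∀ b ∈ (wZeros l (p1+1) q).reverse, b < q := by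
            intro b hb
            rw [List.mem_reverse] at hb
            have := (List.mem_filter.mp hb).1
            have := PySem.List.mem_pyRange_one.mp this
            omega
          rw [List.reverse_append]
          simp only [List.reverse_singleton, List.singleton_append, List.zip_cons_cons,
            pvCountPairs, if_pos hp1q]
          rw [countPairs_zip_append_left _ _ _ (fun a ha b hb => by
            have : a = q := by simpa using ha
            have := hZm b hb; omega)]
          rw [countPairs_zip_append_left _ _ _ (fun a ha b hb => by
            have := hT a ha; have := hZm b hb; omega)]
          ring
        · -- no zero left in the window: q = p1 and l[q] truthy
          have hq0 : PySem.List.pyGetD l q 0 ≠ 0 := by simpa using h2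
          have hqp1 : q = p1 := by
            rcases hq3 with h | h
            · exact absurd h hq0
            · exact h
          have hstep : pvOuterA l (f+1) p1 p2 ops = pvOuterA l f (p1+1) q ops := by
            simp only [pvOuterA, if_pos hpp, if_pos h1, ← hqdef, if_neg h2]
          rw [hstep, hqp1, ih l (p1+1) p1 ops (by omega) (by omega) (by omega)]
          have hOnil : wOnes l (p1+1) (p1+1) = [] := by
            unfold wOnes
            rw [PySem.List.pyRange_one_eq_nil (le_refl _)]
            rfl
          have hZnil : wZeros l p1 (p2+1) = [] := by
            unfold wZeros
            apply List.filter_eq_nil_iff.mpr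
            intro a ha
            have hmem := PySem.List.mem_pyRange_one.mp ha
            by_cases hap : a = p1
            · subst hap; simpa using h1
            · have := hq4 a (by omega) (by omega)
              simp [this]
          rw [hOnil, hZnil]
          simp [pvCountPairs]
      · -- l[p1] == 0: skip it
        have hstep : pvOuterA l (f+1) p1 p2 ops = pvOuterA l f (p1+1) p2 ops := by
          simp only [pvOuterA, if_pos hpp, if_neg h1]
        rw [hstep, ih l (p1+1) p2 ops (by omega) hlen (by omega)]
        have hOnes : wOnes l p1 (p2+1) = wOnes l (p1+1) (p2+1) := by
          unfold wOnes
          rw [PySem.List.pyRange_one_cons (by omega : p1 < p2+1), List.filter_cons]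
          simp [h1]
        have hZeros : wZeros l p1 (p2+1) = p1 :: wZeros l (p1+1) (p2+1) := by
          unfold wZeros
          rw [PySem.List.pyRange_one_cons (by omega : p1 < p2+1), List.filter_cons]
          have : (PySem.List.pyGetD l p1 0 == 0) = true := by
            simp at h1 ⊢; exact h1
          simp [this]
        rw [hOnes, hZeros, List.reverse_cons, countPairs_zip_snd_append _ _ _ (fun a ha => by
          have := (List.mem_filter.mp ha).1
          have := PySem.List.mem_pyRange_one.mp this
          omega)]
    · -- p1 > p2: the loop is over and the window is empty
      have hstep : pvOuterA l (f+1) p1 p2 ops = ops := by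
        simp only [pvOuterA, if_neg hpp]
      have hnil : wOnes l p1 (p2+1) = [] := by
        unfold wOnes
        rw [PySem.List.pyRange_one_eq_nil (by omega)]
        rfl
      rw [hstep, hnil]
      simp [pvCountPairs]

-- ===== VERDICT (by name: the statement is the Claim_ definition above) =====
theorem solve_spec : Claim_equal_solve := by
  intro n l _ hpre
  unfold Spec_solve solve solve_alt
  by_cases hn : n ≤ 0
  · have hfuel : n.toNat + 1 = 1 := by omega
    rw [hfuel, PySem.List.pyRange_one_eq_nil hn]
    have : ¬ ((0:Int) ≤ n - 1) := by omega
    simp [pvOuterA, pvCountPairs]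
    intro h
    omega
  · have hn : 0 < n := by omega
    have hlen : n ≤ (l.length : Int) := by
      rcases hpre with h | h
      · omega
      · exact h
    have := outerA_eq (n.toNat + 1) l 0 (n - 1) 0 (le_refl _) (by omega) (by omega)
    rw [show n - 1 + 1 = n by ring] at this
    rw [this]
    unfold wOnes wZeros
    ring
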